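-- pv_equiv track=rewrite | github.com/QendrimG5/treedepth | ils_solver.py | count_duplicates_test
-- ===== SOURCE A (Python) =====
-- def count_duplicates_test(representation):
--     duplicate_list = list()
--     for c in range(len(representation)):
--         child_list = representation[c]
--         for node in child_list:
--             if node in duplicate_list:
--                 return True
--             else:
--                 duplicate_list.append(node)
--     return False
-- ===== SOURCE B (Python) =====
-- def count_duplicates_test(representation):
--     flat = [node for child in representation for node in child]
--     return len(flat) != len(set(flat))
-- ===== Notes on version B (the rewrite author's own statement) =====
-- stated objective: simpler
-- what changed: Replaces the incremental early-exit membership scan against a growing duplicate list with flattening all child lists once and comparing the flat length to the set cardinality.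
import Mathlib
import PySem

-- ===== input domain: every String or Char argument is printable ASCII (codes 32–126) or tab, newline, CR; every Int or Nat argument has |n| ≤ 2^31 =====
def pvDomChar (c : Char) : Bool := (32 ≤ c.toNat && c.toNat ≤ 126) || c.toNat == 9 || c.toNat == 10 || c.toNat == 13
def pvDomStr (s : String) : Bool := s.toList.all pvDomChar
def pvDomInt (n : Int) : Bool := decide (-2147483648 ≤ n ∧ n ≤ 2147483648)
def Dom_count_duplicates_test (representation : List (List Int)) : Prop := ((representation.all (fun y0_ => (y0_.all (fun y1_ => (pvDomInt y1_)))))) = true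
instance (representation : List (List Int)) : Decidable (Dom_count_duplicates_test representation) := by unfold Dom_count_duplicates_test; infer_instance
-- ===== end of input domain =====

-- B flattens all child lists and compares the flat length to the set cardinality,
-- replacing A's early-exit membership scan against a growing list (objective: simpler).

-- ===== PORT A =====
-- inner 'for node in child_list' loop: returns none on 'return True', else the updated duplicate_list
def cdtInner (dl : List Int) : List Int → Option (List Int)
  | [] => some dl
  | node :: rest => if node ∈ dl then none else cdtInner (dl ++ [node]) rest

-- outer 'for c in range(len(representation))' loop
def cdtOuter (dl : List Int) : List (List Int) → Bool
  | [] => false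
  | child_list :: rest =>
    match cdtInner dl child_list with
    | none => true
    | some dl' => cdtOuter dl' rest

def count_duplicates_test (representation : List (List Int)) : Bool :=
  cdtOuter [] representation

-- ===== PORT B =====
def count_duplicates_test_alt (representation : List (List Int)) : Bool :=
  let flat := representation.flatMap (fun child => child)
  decide (flat.length ≠ (PySem.Set.ofList flat).length)

-- ===== PRECONDITION & SPEC =====
def Spec_count_duplicates_test (representation : List (List Int)) (out : Bool) : Prop := out = count_duplicates_test_alt representation
instance (representation : List (List Int)) (out : Bool) : Decidable (Spec_count_duplicates_test representation out) := by unfold Spec_count_duplicates_test; infer_instance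

-- ===== CLAIM (what is proved, stated in full; the proofs are below) =====
def Claim_equal_count_duplicates_test : Prop := ∀ (representation : List (List Int)), Dom_count_duplicates_test representation → Spec_count_duplicates_test representation (count_duplicates_test representation)

-- ===== LEMMAS AND PROOFS =====

-- A-side inner loop: from a duplicate-free duplicate_list, it returns the extended list
-- when nothing repeats, and signals True (none) exactly when dl ++ cl has a repeat.
theorem cdtInner_spec (cl : List Int) : ∀ dl : List Int, dl.Nodup →
    cdtInner dl cl = (if (dl ++ cl).Nodup then some (dl ++ cl) else none) := by
  induction cl with
  | nil => intro dl h; simp [cdtInner, h]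
  | cons node rest ih =>
    intro dl h
    by_cases hm : node ∈ dl
    · have : ¬ (dl ++ node :: rest).Nodup := by
        intro hn
        exact (List.disjoint_of_nodup_append hn) hm List.mem_cons_self
      simp [cdtInner, hm, this]
    · have hnd : (dl ++ [node]).Nodup :=
        h.append (List.nodup_singleton node)
          (fun a ha hb => hm ((List.mem_singleton.mp hb) ▸ ha))
      rw [cdtInner, if_neg hm, ih _ hnd]
      simp only [List.append_assoc, List.singleton_append]

-- A-side outer loop computes: is dl ++ flatten not duplicate-free?
theorem cdtOuter_spec (cls : List (List Int)) : ∀ dl : List Int, dl.Nodup →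
    cdtOuter dl cls = !decide ((dl ++ cls.flatten).Nodup) := by
  induction cls with
  | nil => intro dl h; simp [cdtOuter, h]
  | cons cl rest ih =>
    intro dl h
    rw [cdtOuter, cdtInner_spec cl dl h]
    by_cases hn : (dl ++ cl).Nodup
    · rw [if_pos hn]
      show cdtOuter (dl ++ cl) rest = _
      rw [ih _ hn, List.flatten_cons, ← List.append_assoc]
    · rw [if_neg hn]
      have hnot : ¬ (dl ++ (cl ++ rest.flatten)).Nodup := by
        intro hh
        rw [← List.append_assoc] at hh
        exact hn (List.Sublist.nodup (List.sublist_append_left _ _) hh)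
      simp [hnot]

-- B-side: the deduplicated length equals the length iff the list is duplicate-free.
theorem ofList_length_iff (l : List Int) : (PySem.Set.ofList l).length = l.length ↔ l.Nodup := by
  induction l using List.reverseRecOn with
  | nil => simp [PySem.Set.ofList]
  | append_singleton xs x ih =>
    rw [PySem.Set.ofList_append_singleton]
    by_cases hx : x ∈ xs
    · have hle : (PySem.Set.ofList xs).length ≤ xs.length := PySem.Set.length_ofList_le xs
      have hadd : PySem.Set.add (PySem.Set.ofList xs) x = PySem.Set.ofList xs := by
        simp [PySem.Set.add, PySem.Set.mem_ofList, hx]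
      have hnd : ¬ (xs ++ [x]).Nodup := by
        intro hcon
        exact (List.disjoint_of_nodup_append hcon) hx (List.mem_singleton.mpr rfl)
      rw [hadd]
      simp only [List.length_append, List.length_singleton]
      constructor
      · intro he; omega
      · intro hcon; exact (hnd hcon).elim
    · have hadd : PySem.Set.add (PySem.Set.ofList xs) x = PySem.Set.ofList xs ++ [x] := by
        simp [PySem.Set.add, PySem.Set.mem_ofList, hx]
      rw [hadd]
      simp only [List.length_append, List.length_singleton]
      constructor
      · intro he
        exact (ih.mp (by omega)).append (List.nodup_singleton x)
          (fun a ha hb => hx ((List.mem_singleton.mp hb) ▸ ha))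
      · intro hcon
        have hxs : xs.Nodup := List.Sublist.nodup (List.sublist_append_left _ _) hcon
        have := ih.mpr hxs
        omega

-- ===== VERDICT (by name: the statement is the Claim_ definition above) =====
theorem count_duplicates_test_spec : Claim_equal_count_duplicates_test := by
  intro r _
  unfold Spec_count_duplicates_test count_duplicates_test count_duplicates_test_alt
  rw [cdtOuter_spec r [] List.nodup_nil]
  simp only [List.nil_append, List.flatMap_id']
  rw [← decide_not]
  exact decide_eq_decide.mpr
    ⟨fun hnd he => hnd ((ofList_length_iff _).mp he.symm),
     fun hne hnd => hne (((ofList_length_iff _).mpr hnd).symm)⟩
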